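-- pv_equiv track=rewrite | github.com/vlnn/zt | src/zt/sim.py | _keyboard_port_byte
-- ===== SOURCE A (Python) =====
-- SPECTRUM_KEY_LAYOUT: dict[int, tuple[int, int]] = {
--     0x01: (0, 0), ord("Z"): (0, 1), ord("X"): (0, 2), ord("C"): (0, 3), ord("V"): (0, 4),
--     ord("A"): (1, 0), ord("S"): (1, 1), ord("D"): (1, 2), ord("F"): (1, 3), ord("G"): (1, 4),
--     ord("Q"): (2, 0), ord("W"): (2, 1), ord("E"): (2, 2), ord("R"): (2, 3), ord("T"): (2, 4),
--     ord("1"): (3, 0), ord("2"): (3, 1), ord("3"): (3, 2), ord("4"): (3, 3), ord("5"): (3, 4),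
--     ord("0"): (4, 0), ord("9"): (4, 1), ord("8"): (4, 2), ord("7"): (4, 3), ord("6"): (4, 4),
--     ord("P"): (5, 0), ord("O"): (5, 1), ord("I"): (5, 2), ord("U"): (5, 3), ord("Y"): (5, 4),
--     0x0D:      (6, 0), ord("L"): (6, 1), ord("K"): (6, 2), ord("J"): (6, 3), ord("H"): (6, 4),
--     ord(" "): (7, 0), 0x02:      (7, 1), ord("M"): (7, 2), ord("N"): (7, 3), ord("B"): (7, 4),
-- }
--
-- def _normalize_ascii(byte: int) -> int:
--     if ord("a") <= byte <= ord("z"):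
--         return byte - 32
--     return byte
--
-- def _keyboard_port_byte(pressed_keys: set[int], high_byte: int) -> int:
--     bits = 0x1F
--     for ascii_code in pressed_keys:
--         location = SPECTRUM_KEY_LAYOUT.get(_normalize_ascii(ascii_code))
--         if location is None:
--             continue
--         row, col = location
--         if (high_byte & (1 << row)) == 0:
--             bits &= ~(1 << col)
--     return (bits & 0x1F) | 0xE0
-- ===== SOURCE B (Python) =====
-- # Row-major keyboard matrix: ROWS[row][col] is the key code at (row, col).
-- ROWS: list[list[int]] = [
--     [0x01, ord("Z"), ord("X"), ord("C"), ord("V")],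
--     [ord("A"), ord("S"), ord("D"), ord("F"), ord("G")],
--     [ord("Q"), ord("W"), ord("E"), ord("R"), ord("T")],
--     [ord("1"), ord("2"), ord("3"), ord("4"), ord("5")],
--     [ord("0"), ord("9"), ord("8"), ord("7"), ord("6")],
--     [ord("P"), ord("O"), ord("I"), ord("U"), ord("Y")],
--     [0x0D, ord("L"), ord("K"), ord("J"), ord("H")],
--     [ord(" "), 0x02, ord("M"), ord("N"), ord("B")],
-- ]
--
--
-- def _keyboard_port_byte(pressed_keys: set[int], high_byte: int) -> int:
--     # Build the normalized pressed set once, then scan the fixed row-major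
--     # matrix accumulating a set-bit mask of pressed columns, and complement
--     # at the end — instead of per-key dict lookups clearing bits.
--     norm = {k - 32 if ord("a") <= k <= ord("z") else k for k in pressed_keys}
--     mask = 0
--     for row, keys in enumerate(ROWS):
--         if high_byte & (1 << row):
--             continue
--         for col, code in enumerate(keys):
--             if code in norm:
--                 mask |= 1 << col
--     return 0xE0 | (0x1F & ~mask)
-- ===== Notes on version B (the rewrite author's own statement) =====
-- stated objective: alternative
-- what changed: B replaces A's per-pressed-key dict lookups and bit-clearing with a different data structure and accumulator: it builds the normalized pressed set once, scans a row-major 8x5 matrix table accumulating a set-bit mask of pressed columns in selected rows, and complements the mask at the end.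
import Mathlib
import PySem

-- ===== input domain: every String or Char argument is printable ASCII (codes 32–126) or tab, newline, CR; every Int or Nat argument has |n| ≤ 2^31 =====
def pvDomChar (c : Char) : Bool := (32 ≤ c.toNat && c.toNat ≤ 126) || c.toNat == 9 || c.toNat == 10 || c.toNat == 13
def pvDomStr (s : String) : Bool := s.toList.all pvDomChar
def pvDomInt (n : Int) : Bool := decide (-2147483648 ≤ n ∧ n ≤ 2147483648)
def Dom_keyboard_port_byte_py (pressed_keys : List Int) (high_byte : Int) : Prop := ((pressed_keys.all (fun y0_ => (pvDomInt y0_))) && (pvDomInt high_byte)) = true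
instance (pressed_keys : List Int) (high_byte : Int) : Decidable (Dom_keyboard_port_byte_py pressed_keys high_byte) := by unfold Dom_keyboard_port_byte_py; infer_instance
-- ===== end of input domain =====

-- B replaces A's per-pressed-key dict lookups and bit-clearing loop by one scan of a
-- row-major matrix table accumulating a set-bit mask, complemented at the end
-- (objective: alternative decomposition/data structure, same cost).

-- ===== PORT A =====
-- SPECTRUM_KEY_LAYOUT (A's module constant; literal dict, keys distinct, insertion order kept)
def spectrumLayout : PySem.Dict Int (Int × Int) := PySem.Dict.mk
  [(1, (0, 0)), (90, (0, 1)), (88, (0, 2)), (67, (0, 3)), (86, (0, 4)),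
   (65, (1, 0)), (83, (1, 1)), (68, (1, 2)), (70, (1, 3)), (71, (1, 4)),
   (81, (2, 0)), (87, (2, 1)), (69, (2, 2)), (82, (2, 3)), (84, (2, 4)),
   (49, (3, 0)), (50, (3, 1)), (51, (3, 2)), (52, (3, 3)), (53, (3, 4)),
   (48, (4, 0)), (57, (4, 1)), (56, (4, 2)), (55, (4, 3)), (54, (4, 4)),
   (80, (5, 0)), (79, (5, 1)), (73, (5, 2)), (85, (5, 3)), (89, (5, 4)),
   (13, (6, 0)), (76, (6, 1)), (75, (6, 2)), (74, (6, 3)), (72, (6, 4)),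
   (32, (7, 0)), (2, (7, 1)), (77, (7, 2)), (78, (7, 3)), (66, (7, 4))]

-- _normalize_ascii
def normKey (b : Int) : Int := if 97 ≤ b ∧ b ≤ 122 then b - 32 else b

-- _keyboard_port_byte (A). Python's '1 << row' / '1 << col' is '1 <<< row.toNat':
-- all rows/cols in the layout are nonnegative, so .toNat is exact.
def keyboard_port_byte_py (pressed_keys : List Int) (high_byte : Int) : Int :=
  PySem.Int.bor
    (PySem.Int.band
      (pressed_keys.foldl (fun bits k =>
        match spectrumLayout.get? (normKey k) with
        | none => bits
        | some rc =>
          if PySem.Int.band high_byte (1 <<< rc.1.toNat) == 0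
          then PySem.Int.band bits (Int.not (1 <<< rc.2.toNat)) else bits) 31)
      31) 224

-- ===== PORT B =====
-- ROWS (B's module constant): row-major matrix, rowsTable[row][col] = key code
def rowsTable : List (List Int) :=
  [[1, 90, 88, 67, 86],
   [65, 83, 68, 70, 71],
   [81, 87, 69, 82, 84],
   [49, 50, 51, 52, 53],
   [48, 57, 56, 55, 54],
   [80, 79, 73, 85, 89],
   [13, 76, 75, 74, 72],
   [32, 2, 77, 78, 66]]

-- _keyboard_port_byte (B). enumerate indices are nonnegative, so .toNat in shifts is exact;
-- Python's 'if high_byte & (1 << row): continue' tests truthiness, i.e. ≠ 0.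
def keyboard_port_byte_py_alt (pressed_keys : List Int) (high_byte : Int) : Int :=
  let norm := PySem.Set.ofList (pressed_keys.map (fun k => if 97 ≤ k ∧ k ≤ 122 then k - 32 else k))
  let mask := (PySem.List.enumerate rowsTable).foldl (fun m re =>
      if PySem.Int.band high_byte (1 <<< re.1.toNat) != 0 then m
      else (PySem.List.enumerate re.2).foldl (fun m' ce =>
        if norm.contains ce.2 then PySem.Int.bor m' (1 <<< ce.1.toNat) else m') m) 0
  PySem.Int.bor 224 (PySem.Int.band 31 (Int.not mask))

-- ===== PRECONDITION & SPEC =====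
def Spec_keyboard_port_byte_py (pressed_keys : List Int) (high_byte : Int) (out : Int) : Prop := out = keyboard_port_byte_py_alt pressed_keys high_byte
instance (pressed_keys : List Int) (high_byte : Int) (out : Int) : Decidable (Spec_keyboard_port_byte_py pressed_keys high_byte out) := by unfold Spec_keyboard_port_byte_py; infer_instance

-- ===== CLAIM (what is proved, stated in full; the proofs are below) =====
def Claim_equal_keyboard_port_byte_py : Prop := ∀ (pressed_keys : List Int) (high_byte : Int), Dom_keyboard_port_byte_py pressed_keys high_byte → Spec_keyboard_port_byte_py pressed_keys high_byte (keyboard_port_byte_py pressed_keys high_byte)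

-- ===== LEMMAS AND PROOFS =====

-- the column cleared by pressed key k under high_byte, if any (A's view)
def colA (hb k : Int) : Option Nat :=
  match spectrumLayout.get? (normKey k) with
  | none => none
  | some rc => if PySem.Int.band hb (1 <<< rc.1.toNat) == 0 then some rc.2.toNat else none

-- the flattened (row, col, code) entries of B's matrix table
def flatEntries : List (Int × Int × Int) :=
  (PySem.List.enumerate rowsTable).flatMap
    (fun re => (PySem.List.enumerate re.2).map (fun ce => (re.1, ce.1, ce.2)))

-- the column whose bit entry e sets under high_byte and normalized set S, if any (B's view)
def colB (hb : Int) (S : PySem.Set Int) (e : Int × Int × Int) : Option Nat :=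
  if PySem.Int.band hb ((1 <<< e.1.toNat : Nat) : Int) == 0 && S.contains e.2.2 then some e.2.1.toNat else none

-- clear the bits of m from b (b & ~m on naturals)
def cN (b m : Nat) : Nat := b - (b &&& m)

-- the 5-bit mask with exactly the flagged column bits set
def canonN (f0 f1 f2 f3 f4 : Bool) : Nat :=
  (if f0 then 1 else 0) + (if f1 then 2 else 0) + (if f2 then 4 else 0) +
    (if f3 then 8 else 0) + (if f4 then 16 else 0)

theorem band_not (b m : Nat) :
    PySem.Int.band (b : Int) (Int.not (m : Int)) = ((cN b m : Nat) : Int) := by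
  have h : Int.not (m : Int) = Int.negSucc m := rfl
  rw [h]
  simp [PySem.Int.band, Int.negSucc_eq, cN]
  intro hle
  exact absurd hle (by omega)

theorem shl1 (c : Nat) : (1 : Int) <<< c = ((2 ^ c : Nat) : Int) := by
  simp [Int.shiftLeft_eq]

theorem mergeClearF : ∀ (b : Fin 32) (c : Fin 5) (f0 f1 f2 f3 f4 : Bool),
    cN (cN b.val (2 ^ c.val)) (canonN f0 f1 f2 f3 f4)
      = cN b.val (canonN ((c.val == 0) || f0) ((c.val == 1) || f1)
          ((c.val == 2) || f2) ((c.val == 3) || f3) ((c.val == 4) || f4)) := by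
  decide

theorem mergeOrF : ∀ (b : Fin 32) (c : Fin 5) (f0 f1 f2 f3 f4 : Bool),
    ((b.val ||| 2 ^ c.val) ||| canonN f0 f1 f2 f3 f4)
      = b.val ||| canonN ((c.val == 0) || f0) ((c.val == 1) || f1)
          ((c.val == 2) || f2) ((c.val == 3) || f3) ((c.val == 4) || f4) := by
  decide

theorem orLtF : ∀ (b : Fin 32) (c : Fin 5), b.val ||| 2 ^ c.val < 32 := by decide

-- a fold of bit-clearing steps equals 'clear the union mask', for columns < 5
theorem foldClear {α : Type} (g : α → Option Nat) (l : List α)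
    (hg : ∀ x ∈ l, ∀ c, g x = some c → c < 5) (b : Nat) (hb : b < 32) :
    l.foldl (fun bits x => match g x with
        | none => bits
        | some c => PySem.Int.band bits (Int.not ((1 : Int) <<< c))) (b : Int)
      = ((cN b (canonN (l.any (fun x => g x == some 0)) (l.any (fun x => g x == some 1))
          (l.any (fun x => g x == some 2)) (l.any (fun x => g x == some 3))
          (l.any (fun x => g x == some 4)))) : Int) := by
  induction l generalizing b with
  | nil => simp [cN, canonN]
  | cons x l ih =>
    rw [List.foldl_cons]
    cases hgx : g x with
    | none =>
      rw [ih (fun y hy => hg y (List.mem_cons_of_mem _ hy)) b hb]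
      simp [hgx]
    | some c =>
      have hc : c < 5 := hg x (List.mem_cons_self) c hgx
      simp only [hgx]  -- reduces the match on g x (linter marks it unused: false positive)
      rw [shl1, band_not]
      have hb' : cN b (2 ^ c) < 32 := lt_of_le_of_lt (Nat.sub_le _ _) hb
      rw [ih (fun y hy => hg y (List.mem_cons_of_mem _ hy)) _ hb']
      rw [mergeClearF ⟨b, hb⟩ ⟨c, hc⟩]
      simp [hgx]

-- a fold of bit-setting steps equals 'OR the union mask', for columns < 5
theorem foldOr {α : Type} (g : α → Option Nat) (l : List α)
    (hg : ∀ x ∈ l, ∀ c, g x = some c → c < 5) (b : Nat) (hb : b < 32) :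
    l.foldl (fun bits x => match g x with
        | none => bits
        | some c => PySem.Int.bor bits ((1 : Int) <<< c)) (b : Int)
      = ((b ||| (canonN (l.any (fun x => g x == some 0)) (l.any (fun x => g x == some 1))
          (l.any (fun x => g x == some 2)) (l.any (fun x => g x == some 3))
          (l.any (fun x => g x == some 4)))) : Int) := by
  induction l generalizing b with
  | nil => simp [canonN]
  | cons x l ih =>
    rw [List.foldl_cons]
    cases hgx : g x with
    | none =>
      rw [ih (fun y hy => hg y (List.mem_cons_of_mem _ hy)) b hb]
      simp [hgx]
    | some c =>
      have hc : c < 5 := hg x (List.mem_cons_self) c hgx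
      simp only [hgx]  -- reduces the match on g x (linter marks it unused: false positive)
      rw [shl1, PySem.Int.bor_natCast]
      have hb' : b ||| 2 ^ c < 32 := orLtF ⟨b, hb⟩ ⟨c, hc⟩
      rw [ih (fun y hy => hg y (List.mem_cons_of_mem _ hy)) _ hb']
      rw [mergeOrF ⟨b, hb⟩ ⟨c, hc⟩]
      simp [hgx]

theorem layout_cols_lt : ∀ e ∈ spectrumLayout.items, e.2.2.toNat < 5 := by decide

theorem flat_cols_lt : ∀ e ∈ flatEntries, e.2.1.toNat < 5 := by decide

-- each layout entry appears in B's flattened matrix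
theorem bridgeFwd : ∀ p ∈ spectrumLayout.items, (p.2.1, p.2.2, p.1) ∈ flatEntries := by decide

-- each flattened matrix entry is a layout entry
theorem bridgeBwd : ∀ e ∈ flatEntries, spectrumLayout.get? e.2.2 = some (e.1, e.2.1) := by decide

theorem colA_lt (hb k : Int) (c : Nat) (h : colA hb k = some c) : c < 5 := by
  unfold colA at h
  cases hget : spectrumLayout.get? (normKey k) with
  | none => rw [hget] at h; simp at h
  | some rc =>
    rw [hget] at h
    simp at h
    have h5 : rc.2.toNat < 5 :=
      layout_cols_lt (normKey k, rc) (PySem.Dict.mem_items_of_get?_eq_some _ hget)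
    omega

-- A's step function is the colA-directed clearing step
theorem stepA_eq (hb : Int) (bits k : Int) :
    (match spectrumLayout.get? (normKey k) with
      | none => bits
      | some rc =>
        if PySem.Int.band hb (1 <<< rc.1.toNat) == 0
        then PySem.Int.band bits (Int.not (1 <<< rc.2.toNat)) else bits)
    = (match colA hb k with
      | none => bits
      | some c => PySem.Int.band bits (Int.not ((1 : Int) <<< c))) := by
  unfold colA
  cases spectrumLayout.get? (normKey k) with
  | none => rfl
  | some rc =>
    simp only []
    split_ifs <;> rfl

-- B's nested fold over the enumerated matrix equals a flat fold over flatEntries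
theorem shlNat (n : Nat) : ((1 <<< n : Nat) : Int) = (1 : Int) <<< n := by
  rw [Nat.one_shiftLeft, shl1]

theorem innerSel (hb : Int) (S : PySem.Set Int) (r : Int)
    (hsel : PySem.Int.band hb ((1 <<< r.toNat : Nat) : Int) = 0) (l' : List (Int × Int)) :
    ∀ init : Int,
    l'.foldl (fun m' ce => if S.contains ce.2 then PySem.Int.bor m' ((1 <<< ce.1.toNat : Nat) : Int) else m') init
      = l'.foldl (fun x y => match colB hb S (r, y.1, y.2) with
          | none => x
          | some c => PySem.Int.bor x ((1 : Int) <<< c)) init := by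
  induction l' with
  | nil => intro init; rfl
  | cons ce l' ih =>
    intro init
    rw [List.foldl_cons, List.foldl_cons, ih]
    congr 1
    have hcb : colB hb S (r, ce.1, ce.2)
        = if S.contains ce.2 then some ce.1.toNat else none := by
      unfold colB
      simp only [shlNat] at hsel
      simp [hsel]
    rw [hcb]
    by_cases hS : S.contains ce.2 = true
    · rw [if_pos hS, if_pos hS, shlNat]
    · rw [if_neg hS, if_neg hS]

theorem innerNoSel (hb : Int) (S : PySem.Set Int) (r : Int)
    (hsel : ¬ PySem.Int.band hb ((1 <<< r.toNat : Nat) : Int) = 0) (l' : List (Int × Int)) :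
    ∀ init : Int,
    init = l'.foldl (fun x y => match colB hb S (r, y.1, y.2) with
        | none => x
        | some c => PySem.Int.bor x ((1 : Int) <<< c)) init := by
  induction l' with
  | nil => intro init; rfl
  | cons ce l' ih =>
    intro init
    rw [List.foldl_cons]
    have hcb : colB hb S (r, ce.1, ce.2) = none := by
      unfold colB
      simp only [shlNat] at hsel
      simp [hsel]
    rw [hcb]
    exact ih init

theorem nested_eq_flat (hb : Int) (S : PySem.Set Int) (init : Int) :
    (PySem.List.enumerate rowsTable).foldl (fun m re =>
        if PySem.Int.band hb (1 <<< re.1.toNat) != 0 then m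
        else (PySem.List.enumerate re.2).foldl (fun m' ce =>
          if S.contains ce.2 then PySem.Int.bor m' (1 <<< ce.1.toNat) else m') m) init
      = flatEntries.foldl (fun m e =>
          match colB hb S e with
          | none => m
          | some c => PySem.Int.bor m ((1 : Int) <<< c)) init := by
  unfold flatEntries
  generalize PySem.List.enumerate rowsTable = l
  induction l generalizing init with
  | nil => simp
  | cons re l ih =>
    rw [List.foldl_cons, List.flatMap_cons, List.foldl_append, List.foldl_map, ← ih]
    congr 1
    by_cases hsel : PySem.Int.band hb ((1 <<< re.1.toNat : Nat) : Int) = 0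
    · simp only [hsel, bne_self_eq_false, Bool.false_eq_true, if_false]
      exact innerSel hb S re.1 hsel _ init
    · have hg : (PySem.Int.band hb ((1 <<< re.1.toNat : Nat) : Int) != 0) = true := by
        simpa using hsel
      simp only [hg, if_true]
      exact innerNoSel hb S re.1 hsel _ init

-- the same columns are flagged on both sides
theorem flags_eq (pressed : List Int) (hb : Int) (c : Nat) :
    pressed.any (fun k => colA hb k == some c)
      = flatEntries.any
          (fun e => colB hb (PySem.Set.ofList (pressed.map normKey)) e == some c) := by
  rw [Bool.eq_iff_iff]
  simp only [List.any_eq_true, beq_iff_eq]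
  constructor
  · rintro ⟨k, hk, hcol⟩
    unfold colA at hcol
    cases hget : spectrumLayout.get? (normKey k) with
    | none => rw [hget] at hcol; simp at hcol
    | some rc =>
      rw [hget] at hcol
      simp at hcol
      refine ⟨(rc.1, rc.2, normKey k), ?_, ?_⟩
      · have := bridgeFwd (normKey k, rc) (PySem.Dict.mem_items_of_get?_eq_some _ hget)
        simpa using this
      · unfold colB
        simp only []
        rw [if_pos]
        · simpa using hcol.2
        · simp only [Bool.and_eq_true, beq_iff_eq]
          refine ⟨by simpa using hcol.1, ?_⟩
          exact (PySem.Set.contains_iff _ _).mpr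
            ((PySem.Set.mem_ofList _ _).mpr (List.mem_map_of_mem hk))
  · rintro ⟨e, he, hcol⟩
    unfold colB at hcol
    simp at hcol
    obtain ⟨⟨hrow, hmem⟩, hcval⟩ := hcol
    obtain ⟨k, hk, hnk⟩ := hmem
    refine ⟨k, hk, ?_⟩
    have hget : spectrumLayout.get? e.2.2 = some (e.1, e.2.1) := bridgeBwd e he
    unfold colA
    rw [hnk, hget]
    simp
    exact ⟨hrow, hcval⟩

theorem canonN_lt (f0 f1 f2 f3 f4 : Bool) : canonN f0 f1 f2 f3 f4 < 32 := by
  unfold canonN; split_ifs <;> omega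

-- the two output assemblies agree for any 5-bit flag mask
theorem assemble_eq : ∀ m : Fin 32,
    PySem.Int.bor (PySem.Int.band ((cN 31 m.val : Nat) : Int) 31) 224
      = PySem.Int.bor 224 (PySem.Int.band 31 (Int.not (((0 ||| m.val : Nat)) : Int))) := by
  decide

theorem cast31 : ((31 : Nat) : Int) = (31 : Int) := by norm_num
theorem cast0 : ((0 : Nat) : Int) = (0 : Int) := by norm_num

-- ===== VERDICT (by name: the statement is the Claim_ definition above) =====
theorem keyboard_port_byte_py_spec : Claim_equal_keyboard_port_byte_py := by
  intro pressed hb _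
  unfold Spec_keyboard_port_byte_py keyboard_port_byte_py keyboard_port_byte_py_alt
  simp only []
  have hA : (fun (bits k : Int) =>
      match spectrumLayout.get? (normKey k) with
      | none => bits
      | some rc =>
        if PySem.Int.band hb (1 <<< rc.1.toNat) == 0
        then PySem.Int.band bits (Int.not (1 <<< rc.2.toNat)) else bits)
      = fun bits k => match colA hb k with
        | none => bits
        | some c => PySem.Int.band bits (Int.not ((1 : Int) <<< c)) := by
    funext bits k; exact stepA_eq hb bits k
  have hnormmap : (pressed.map (fun k => if 97 ≤ k ∧ k ≤ 122 then k - 32 else k))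
      = pressed.map normKey := rfl
  rw [hA, hnormmap, nested_eq_flat hb (PySem.Set.ofList (pressed.map normKey)) 0, ← cast31,
    foldClear (colA hb) pressed (fun k _ c h => colA_lt hb k c h) 31 (by omega), ← cast0,
    foldOr (colB hb (PySem.Set.ofList (pressed.map normKey))) flatEntries
      (fun e he c h => by
        unfold colB at h
        split at h
        · simp only [Option.some.injEq] at h
          have := flat_cols_lt e he
          omega
        · exact absurd h (by simp)) 0 (by omega),
    flags_eq, flags_eq, flags_eq, flags_eq, flags_eq]
  exact assemble_eq ⟨canonN _ _ _ _ _, canonN_lt _ _ _ _ _⟩
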